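-- pv_equiv track=rewrite | github.com/Rlatldn18/Baekjoon-test | Python/백준/Silver/2346. 풍선 터뜨리기/풍선 터뜨리기.py | balloon
-- ===== SOURCE A (Python) =====
-- from collections import deque
--
-- def balloon(t, kill):
--      # (풍선 번호, 이동값) 형태로 deque 생성
--     dq = deque((i+1, kill[i]) for i in range(t))
--     result = [] # 터진 풍선 번호 저장
--
--     while dq: #풍선 터뜨리기
--         idx, move = dq.popleft()
--         result.append(idx)
--
--         if not dq:
--             break
--
--         if move > 0:
--             #양수일때 왼쪽으로 이동
--             dq.rotate(-(move-1))
--         else: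
--             # 음수는 오른쪽 이동
--             dq.rotate(-move)
--     return result
-- ===== SOURCE B (Python) =====
-- def balloon(t, kill):
--     alive = [(i + 1, kill[i]) for i in range(t)]
--     result = []
--     pos = 0
--     while alive:
--         idx, move = alive.pop(pos)
--         result.append(idx)
--         n = len(alive)
--         if n == 0:
--             break
--         pos = (pos + (move - 1 if move > 0 else move)) % n
--     return result
-- ===== Notes on version B (the rewrite author's own statement) =====
-- stated objective: alternative
-- what changed: B replaces A's physical deque rotations (popleft + rotate after every pop) by a static list with a modular index pointer: it pops the element at position pos and computes the next front position arithmetically as (pos + move-1 or pos + move) mod n, never rotating any container.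
import Mathlib
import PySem

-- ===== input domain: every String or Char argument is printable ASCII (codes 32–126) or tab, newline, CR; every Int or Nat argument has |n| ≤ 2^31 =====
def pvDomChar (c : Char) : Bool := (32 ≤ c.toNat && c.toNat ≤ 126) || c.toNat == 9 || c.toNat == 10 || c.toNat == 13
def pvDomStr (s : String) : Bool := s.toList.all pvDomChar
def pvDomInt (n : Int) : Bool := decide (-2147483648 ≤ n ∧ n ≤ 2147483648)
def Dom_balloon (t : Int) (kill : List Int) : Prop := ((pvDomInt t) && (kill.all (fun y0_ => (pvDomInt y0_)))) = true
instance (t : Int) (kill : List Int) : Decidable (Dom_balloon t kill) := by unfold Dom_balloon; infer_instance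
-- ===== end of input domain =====

-- B replaces A's physical deque rotations by a static list plus a modular index pointer
-- (pop at pos, next pos computed arithmetically); alternative decomposition, return value only.

-- ===== PORT A =====
-- deque.rotate(-k) = rotate LEFT by k; for a nonempty deque that is List.rotate by (k mod len),
-- with Python's floor mod (nonnegative for a positive divisor). Exact; empty deque is a no-op.
def rotLeftA (l : List (Int × Int)) (k : Int) : List (Int × Int) :=
  if l.length = 0 then l else l.rotate ((PySem.Int.mod k (l.length : Int)).toNat)

theorem length_rotLeftA (l : List (Int × Int)) (k : Int) : (rotLeftA l k).length = l.length := by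
  unfold rotLeftA; split <;> simp

-- the while loop of A: popleft, append, break if empty, rotate
def balloonLoopA (dq : List (Int × Int)) (res : List Int) : List Int :=
  match dq with
  | [] => res.reverse
  | (idx, move) :: rest =>
    if rest.length = 0 then (idx :: res).reverse
    else balloonLoopA (rotLeftA rest (if move > 0 then move - 1 else move)) (idx :: res)
termination_by dq.length
decreasing_by simp [length_rotLeftA]

def balloon (t : Int) (kill : List Int) : List Int :=
  -- kill[i]: in-range under Pre_balloon (getD 0 is never the value used there)
  balloonLoopA ((PySem.List.pyRange 0 t 1).map (fun i => (i + 1, PySem.List.pyGetD kill i 0))) []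

-- ===== PORT B =====
-- the while loop of B: pop at pos, append, recompute pos by Python mod
def balloonLoopB (alive : List (Int × Int)) (pos : Int) (res : List Int) : List Int :=
  match h : PySem.List.pop? alive pos with
  | none => res.reverse   -- alive = [] (loop exit); invalid pos is never reached from balloon_alt
  | some ((idx, move), rest) =>
    if rest.length = 0 then (idx :: res).reverse
    else balloonLoopB rest
      (PySem.Int.mod (pos + (if move > 0 then move - 1 else move)) (rest.length : Int))
      (idx :: res)
termination_by alive.length
decreasing_by
  have := PySem.List.length_of_pop?_eq_some alive h
  simp at this
  omega

def balloon_alt (t : Int) (kill : List Int) : List Int :=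
  balloonLoopB ((PySem.List.pyRange 0 t 1).map (fun i => (i + 1, PySem.List.pyGetD kill i 0))) 0 []

-- ===== PRECONDITION & SPEC =====
-- Pre_ excludes t > len(kill), where Python A raises IndexError while building the deque.
def Pre_balloon (t : Int) (kill : List Int) : Prop := t ≤ (kill.length : Int)
instance (t : Int) (kill : List Int) : Decidable (Pre_balloon t kill) := by unfold Pre_balloon; infer_instance
def pvWitness_balloon : Int × List Int := (3, [2, -1, 1])

def Spec_balloon (t : Int) (kill : List Int) (out : List Int) : Prop := out = balloon_alt t kill
instance (t : Int) (kill : List Int) (out : List Int) : Decidable (Spec_balloon t kill out) := by unfold Spec_balloon; infer_instance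

-- ===== CLAIM (what is proved, stated in full; the proofs are below) =====
def Claim_equal_balloon : Prop := ∀ (t : Int) (kill : List Int), Dom_balloon t kill → Pre_balloon t kill → Spec_balloon t kill (balloon t kill)

-- ===== LEMMAS AND PROOFS =====

-- popping the front of the rotated list exposes l[p]
theorem rotate_eq_cons {α : Type} (l : List α) (p : Nat) (hp : p < l.length) :
    l.rotate p = l[p] :: (l.drop (p + 1) ++ l.take p) := by
  rw [List.rotate_eq_drop_append_take (le_of_lt hp), List.drop_eq_getElem_cons hp,
    List.cons_append]

-- A's remaining deque after popleft is B's remaining list rotated to the new front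
theorem tail_rotate_eq {α : Type} (l : List α) (p : Nat) (hp : p < l.length) (h2 : 2 ≤ l.length) :
    l.drop (p + 1) ++ l.take p = (l.eraseIdx p).rotate (p % (l.length - 1)) := by
  have hlen : (l.eraseIdx p).length = l.length - 1 := by
    rw [List.length_eraseIdx_of_lt hp]
  rw [List.eraseIdx_eq_take_drop_succ]
  by_cases hcase : p = l.length - 1
  · have h1 : p % (l.length - 1) = 0 := by rw [hcase]; exact Nat.mod_self _
    have hd : l.drop (p + 1) = [] := by
      apply List.drop_eq_nil_of_le; omega
    rw [h1, List.rotate_zero, hd]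
    simp
  · have hplt : p < l.length - 1 := by omega
    have h1 : p % (l.length - 1) = p := Nat.mod_eq_of_lt hplt
    rw [h1]
    have hle : p ≤ (l.take p ++ l.drop (p + 1)).length := by
      simp; omega
    rw [List.rotate_eq_drop_append_take hle]
    have htk : (l.take p).length = p := by simp; omega
    rw [List.drop_append_of_le_length (by omega), List.take_append_of_le_length (by omega)]
    simp [htk]

-- index arithmetic: rotating by k from front position p lands at (p + k) mod m
theorem mod_index_eq (p : Nat) (k : Int) (m : Nat) (hm : 0 < m) :
    (p % m + (PySem.Int.mod k (m : Int)).toNat) % m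
      = (PySem.Int.mod ((p : Int) + k) (m : Int)).toNat := by
  have hmpos : (0 : Int) < (m : Int) := by exact_mod_cast hm
  rw [PySem.Int.mod_eq_emod_of_pos hmpos, PySem.Int.mod_eq_emod_of_pos hmpos]
  have hk : (0 : Int) ≤ k % (m : Int) := Int.emod_nonneg k (by omega)
  have hpk : (0 : Int) ≤ ((p : Int) + k) % (m : Int) := Int.emod_nonneg _ (by omega)
  have hcast : (((p % m + ((k % (m : Int)).toNat)) % m : Nat) : Int)
      = ((p : Int) + k) % (m : Int) := by
    rw [Int.natCast_mod, Nat.cast_add, Int.natCast_mod,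
      Int.toNat_of_nonneg hk, ← Int.add_emod]
  omega

-- main loop invariant: A's deque is B's alive list rotated so that alive[pos] is in front
theorem balloonLoopB_none (alive : List (Int × Int)) (pos : Int) (res : List Int)
    (h : PySem.List.pop? alive pos = none) :
    balloonLoopB alive pos res = res.reverse := by
  unfold balloonLoopB
  split
  · rfl
  · rename_i idx' move' rest' h'
    rw [h] at h'
    simp at h'

theorem balloonLoopB_some (alive : List (Int × Int)) (pos : Int) (res : List Int)
    (idx move : Int) (rest : List (Int × Int))
    (h : PySem.List.pop? alive pos = some ((idx, move), rest)) :
    balloonLoopB alive pos res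
      = if rest.length = 0 then (idx :: res).reverse
        else balloonLoopB rest
          (PySem.Int.mod (pos + (if move > 0 then move - 1 else move)) (rest.length : Int))
          (idx :: res) := by
  conv_lhs => unfold balloonLoopB
  split
  · rename_i h'
    rw [h] at h'
    simp at h'
  · rename_i idx' move' rest' h'
    rw [h] at h'
    simp only [Option.some.injEq, Prod.mk.injEq] at h'
    obtain ⟨⟨h1, h2⟩, h3⟩ := h'
    subst h1; subst h2; subst h3
    rfl

theorem loop_agree (n : Nat) : ∀ (alive : List (Int × Int)) (p : Nat) (res : List Int),
    alive.length = n → p < n →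
    balloonLoopA (alive.rotate p) res = balloonLoopB alive ((p : Nat) : Int) res := by
  induction n using Nat.strong_induction_on with
  | _ n IH =>
    intro alive p res hlen hp
    have hplen : p < alive.length := by omega
    have hget := PySem.List.pop?_natCast alive p hplen
    cases hpm : alive[p] with
    | mk idx move =>
    rw [hpm] at hget
    have herlen : (alive.eraseIdx p).length = n - 1 := by
      rw [List.length_eraseIdx_of_lt hplen]; omega
    have htlen : (alive.drop (p + 1) ++ alive.take p).length = n - 1 := by
      simp; omega
    rw [rotate_eq_cons alive p hplen, hpm]
    rw [balloonLoopA.eq_def]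
    dsimp only
    rw [balloonLoopB_some alive ((p : Nat) : Int) res idx move (alive.eraseIdx p) hget]
    by_cases hone : n = 1
    · rw [if_pos (show (alive.drop (p + 1) ++ alive.take p).length = 0 by omega),
          if_pos (show (alive.eraseIdx p).length = 0 by omega)]
    · have h2 : 2 ≤ alive.length := by omega
      have hm : 0 < n - 1 := by omega
      rw [if_neg (show ¬ (alive.drop (p + 1) ++ alive.take p).length = 0 by omega),
          if_neg (show ¬ (alive.eraseIdx p).length = 0 by omega)]
      set k : Int := if move > 0 then move - 1 else move with hk
      have htail : alive.drop (p + 1) ++ alive.take p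
          = (alive.eraseIdx p).rotate (p % (alive.length - 1)) :=
        tail_rotate_eq alive p hplen h2
      have hrot : rotLeftA (alive.drop (p + 1) ++ alive.take p) k
          = (alive.eraseIdx p).rotate
              ((PySem.Int.mod ((p : Int) + k) (((n - 1 : Nat)) : Int)).toNat) := by
        unfold rotLeftA
        rw [if_neg (show ¬ (alive.drop (p + 1) ++ alive.take p).length = 0 by omega)]
        rw [htlen, htail, List.rotate_rotate, ← List.rotate_mod, herlen, hlen]
        rw [mod_index_eq p k (n - 1) hm]
      rw [hrot, herlen]
      have hmpos : (0 : Int) < (((n - 1 : Nat)) : Int) := by exact_mod_cast hm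
      have hnonneg : (0 : Int) ≤ PySem.Int.mod ((p : Int) + k) (((n - 1 : Nat)) : Int) := by
        rw [PySem.Int.mod_eq_emod_of_pos hmpos]
        exact Int.emod_nonneg _ (by omega)
      have hlt : (PySem.Int.mod ((p : Int) + k) (((n - 1 : Nat)) : Int)).toNat < n - 1 := by
        rw [PySem.Int.mod_eq_emod_of_pos hmpos] at hnonneg ⊢
        have := Int.emod_lt_of_pos ((p : Int) + k) hmpos
        omega
      have hIH := IH (n - 1) (by omega) (alive.eraseIdx p)
        ((PySem.Int.mod ((p : Int) + k) (((n - 1 : Nat)) : Int)).toNat) (idx :: res) herlen hlt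
      rw [Int.toNat_of_nonneg hnonneg] at hIH
      exact hIH

-- ===== VERDICT (by name: the statement is the Claim_ definition above) =====
theorem balloon_spec : Claim_equal_balloon := by
  intro t kill _ _
  unfold Spec_balloon balloon balloon_alt
  set init := (PySem.List.pyRange 0 t 1).map (fun i => (i + 1, PySem.List.pyGetD kill i 0)) with hinit
  by_cases hnil : init = []
  · rw [hnil]
    rw [balloonLoopA.eq_def]
    dsimp only
    rw [balloonLoopB_none [] 0 [] (by simp [PySem.List.pop?, PySem.List.pyIdx?])]
  · have hlen : 0 < init.length := List.length_pos_of_ne_nil hnil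
    have := loop_agree init.length init 0 [] rfl hlen
    rw [List.rotate_zero] at this
    simpa using this
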